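-- pv_equiv track=rewrite | github.com/AlessandroRomanelli/USI-Spring-2018 | Semester 2/Algorithms/Week13/ex1tris.py | lenOfIrregEx
-- ===== SOURCE A (Python) =====
-- def lenOfIrregEx(A):
--     if len(A) < 2:
--         return len(A)
--     signs = []
--     for i in range(1,len(A)):
--         if A[i-1] > A[i]:
--             if len(signs) == 0 or signs[-1] != ">":
--                 signs.append(">")
--         elif A[i-1] < A[i]:
--             if len(signs) != 0 and signs[-1] != "<":
--                 signs.append("<")
--     return len(signs) + 1
-- ===== SOURCE B (Python) =====
-- def lenOfIrregEx(A):
--     if len(A) < 2: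
--         return len(A)
--     t = [x > y for x, y in zip(A, A[1:]) if x != y]
--     if True not in t:
--         return 1
--     j = t.index(True)
--     return 2 + sum(x != y for x, y in zip(t[j:], t[j + 1:]))
-- ===== Notes on version B (the rewrite author's own statement) =====
-- stated objective: alternative
-- what changed: A builds a collapsed sign list in one stateful loop with last-element tests; B never builds such a list: it reduces each adjacent pair to a boolean descent token, locates the first descent with index(), and returns a closed-form count 2 + number of sign changes among the tokens after that first descent (or 1 if no descent exists).
import Mathlib
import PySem

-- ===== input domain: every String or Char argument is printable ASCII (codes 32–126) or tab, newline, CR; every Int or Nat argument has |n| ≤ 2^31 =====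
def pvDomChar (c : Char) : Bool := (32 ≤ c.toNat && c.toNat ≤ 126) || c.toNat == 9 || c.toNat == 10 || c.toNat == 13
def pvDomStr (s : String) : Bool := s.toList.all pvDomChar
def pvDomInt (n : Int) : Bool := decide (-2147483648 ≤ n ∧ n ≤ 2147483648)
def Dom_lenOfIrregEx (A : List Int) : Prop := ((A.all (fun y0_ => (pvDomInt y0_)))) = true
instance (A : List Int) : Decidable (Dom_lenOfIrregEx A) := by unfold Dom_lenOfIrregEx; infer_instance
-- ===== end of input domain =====

-- B re-implements A by a different algorithm (objective: alternative): instead of A's stateful loop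
-- that mutates a collapsed sign list, B reduces the input to boolean descent tokens, finds the FIRST
-- descent with index(), and returns the closed-form count 2 + (# sign changes after that first descent),
-- or 1 when no descent exists.

-- ===== PORT A =====
-- literal transliteration of A: index loop over range(1, len(A)) building the list `signs`
def lenOfIrregEx (A : List Int) : Int :=
  if A.length < 2 then (A.length : Int)
  else
    let signs : List String :=
      (PySem.List.pyRange 1 (A.length : Int) 1).foldl
        (fun (signs : List String) (i : Int) =>
          if PySem.List.pyGetD A (i - 1) 0 > PySem.List.pyGetD A i 0 then
            (if signs.length = 0 ∨ PySem.List.pyGet? signs (-1) ≠ some ">" then signs ++ [">"] else signs)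
          else if PySem.List.pyGetD A (i - 1) 0 < PySem.List.pyGetD A i 0 then
            (if signs.length ≠ 0 ∧ PySem.List.pyGet? signs (-1) ≠ some "<" then signs ++ ["<"] else signs)
          else signs) []
    (signs.length : Int) + 1

-- ===== PORT B =====
-- B-side helper: the descent token of one adjacent pair (true = strict descent, none when equal)
def pvTokOfB (p : Int × Int) : Option Bool :=
  if p.1 ≠ p.2 then some (decide (p.1 > p.2)) else none

-- literal transliteration of B (Source B): token list, first-descent index, sign-change count after it
def lenOfIrregEx_alt (A : List Int) : Int :=
  if A.length < 2 then (A.length : Int)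
  else
    let t : List Bool := (A.zip (PySem.List.slice A (some 1) none)).filterMap pvTokOfB
    if ¬ t.contains true then 1
    else
      let j : Nat := (PySem.List.index? t true).getD 0
      2 + (((PySem.List.slice t (some (j : Int)) none).zip
              (PySem.List.slice t (some ((j : Int) + 1)) none)).map
            (fun p => if p.1 ≠ p.2 then (1 : Int) else 0)).sum

-- ===== PRECONDITION & SPEC =====
def Spec_lenOfIrregEx (A : List Int) (out : Int) : Prop := out = lenOfIrregEx_alt A
instance (A : List Int) (out : Int) : Decidable (Spec_lenOfIrregEx A out) := by unfold Spec_lenOfIrregEx; infer_instance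

-- ===== CLAIM (what is proved, stated in full; the proofs are below) =====
def Claim_equal_lenOfIrregEx : Prop := ∀ (A : List Int), Dom_lenOfIrregEx A → Spec_lenOfIrregEx A (lenOfIrregEx A)

-- ===== LEMMAS AND PROOFS =====

-- A-side token of a pair, and A's loop body as a function of the pair / of the token
def pvTokOf (p : Int × Int) : Option String :=
  if p.1 ≠ p.2 then some (if p.1 > p.2 then ">" else "<") else none

def pvG (signs : List String) (p : Int × Int) : List String :=
  if p.1 > p.2 then
    (if signs.length = 0 ∨ PySem.List.pyGet? signs (-1) ≠ some ">" then signs ++ [">"] else signs)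
  else if p.1 < p.2 then
    (if signs.length ≠ 0 ∧ PySem.List.pyGet? signs (-1) ≠ some "<" then signs ++ ["<"] else signs)
  else signs

def pvTokStep (signs : List String) (t : String) : List String :=
  if t = ">" then (if signs.length = 0 ∨ PySem.List.pyGet? signs (-1) ≠ some ">" then signs ++ [">"] else signs)
  else (if signs.length ≠ 0 ∧ PySem.List.pyGet? signs (-1) ≠ some "<" then signs ++ ["<"] else signs)

-- the same step on boolean tokens (true = ">")
def pvBoolStep (S : List Bool) : Bool → List Bool
  | true => if S.length = 0 ∨ S.getLast? ≠ some true then S ++ [true] else S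
  | false => if S.length ≠ 0 ∧ S.getLast? ≠ some false then S ++ [false] else S

def pvF : Bool → String
  | true => ">"
  | false => "<"

-- number of adjacent sign changes in a boolean token list
def pvChg : List Bool → Nat
  | [] => 0
  | [_] => 0
  | a :: b :: rest => (if a != b then 1 else 0) + pvChg (b :: rest)

lemma pvPairsMap (A : List Int) :
    (PySem.List.pyRange 1 (A.length : Int) 1).map
      (fun i => ((PySem.List.pyGetD A (i - 1) 0 : Int), (PySem.List.pyGetD A i 0 : Int)))
      = A.zip A.tail := by
  apply List.ext_getElem
  · simp [PySem.List.length_pyRange_one]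
  · intro k h1 h2
    have hk : k + 1 < A.length := by
      simp [PySem.List.length_pyRange_one] at h1
      omega
    simp only [List.getElem_map, PySem.List.getElem_pyRange_one, List.getElem_zip, List.getElem_tail]
    have e1 : (1 : Int) + k - 1 = ((k : Nat) : Int) := by ring
    have e2 : (1 : Int) + k = (((k + 1 : Nat)) : Int) := by push_cast; ring
    rw [e1, e2, PySem.List.pyGetD_natCast, PySem.List.pyGetD_natCast]
    simp [List.getD_eq_getElem?_getD, List.getElem?_eq_getElem (by omega : k < A.length),
      List.getElem?_eq_getElem hk]

-- A's fold over the pair list equals a fold of pvTokStep over A's token list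
lemma pvFoldTok (L : List (Int × Int)) (s : List String) :
    L.foldl pvG s = (L.filterMap pvTokOf).foldl pvTokStep s := by
  induction L generalizing s with
  | nil => rfl
  | cons p L ih =>
    rcases lt_trichotomy p.1 p.2 with h | h | h
    · have ha : pvG s p = pvTokStep s "<" := by
        simp [pvG, pvTokStep, h, if_neg (by omega : ¬ p.1 > p.2)]
      have hb : pvTokOf p = some "<" := by
        simp [pvTokOf, if_pos (by omega : p.1 ≠ p.2), if_neg (by omega : ¬ p.1 > p.2)]
      simp only [List.foldl_cons, List.filterMap_cons, hb, ha, List.foldl_cons]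
      exact ih _
    · have ha : pvG s p = s := by simp [pvG, h]
      have hb : pvTokOf p = none := by simp [pvTokOf, h]
      simp only [List.foldl_cons, List.filterMap_cons, hb, ha]
      exact ih s
    · have ha : pvG s p = pvTokStep s ">" := by simp [pvG, pvTokStep, h]
      have hb : pvTokOf p = some ">" := by
        simp [pvTokOf, if_pos (by omega : p.1 ≠ p.2), if_pos h]
      simp only [List.foldl_cons, List.filterMap_cons, hb, ha, List.foldl_cons]
      exact ih _

-- A's string tokens are B's boolean tokens through pvF
lemma pvTokMapF (L : List (Int × Int)) :
    L.filterMap pvTokOf = (L.filterMap pvTokOfB).map pvF := by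
  induction L with
  | nil => rfl
  | cons p L ih =>
    rcases lt_trichotomy p.1 p.2 with h | h | h
    · have h1 : pvTokOf p = some "<" := by
        simp [pvTokOf, if_pos (by omega : p.1 ≠ p.2), if_neg (by omega : ¬ p.1 > p.2)]
      have h2 : pvTokOfB p = some false := by
        unfold pvTokOfB
        rw [if_pos (by omega : p.1 ≠ p.2)]
        simp only [Option.some.injEq, decide_eq_false_iff_not]
        omega
      simp only [List.filterMap_cons, h1, h2, List.map_cons, ih, pvF]
    · have h1 : pvTokOf p = none := by simp [pvTokOf, h]
      have h2 : pvTokOfB p = none := by simp [pvTokOfB, h]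
      simp only [List.filterMap_cons, h1, h2, ih]
    · have h1 : pvTokOf p = some ">" := by
        simp [pvTokOf, if_pos (by omega : p.1 ≠ p.2), if_pos h]
      have h2 : pvTokOfB p = some true := by
        unfold pvTokOfB
        rw [if_pos (by omega : p.1 ≠ p.2)]
        simp only [Option.some.injEq, decide_eq_true_eq]
        omega
      simp only [List.filterMap_cons, h1, h2, List.map_cons, ih, pvF]

lemma pvF_inj_last (S : List Bool) (b : Bool) :
    (S.map pvF).getLast? = some (pvF b) ↔ S.getLast? = some b := by
  rw [List.getLast?_map]
  cases h : S.getLast? with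
  | none => simp
  | some c =>
    simp only [Option.map_some, Option.some.injEq]
    cases b <;> cases c <;> simp [pvF]

-- one step of the string fold is one step of the boolean fold through pvF
lemma pvStepMapF (S : List Bool) (b : Bool) :
    pvTokStep (S.map pvF) (pvF b) = (pvBoolStep S b).map pvF := by
  have hget : PySem.List.pyGet? (S.map pvF) (-1) = (S.map pvF).getLast? :=
    PySem.List.pyGet?_neg_one _
  cases b with
  | true =>
    show pvTokStep (S.map pvF) ">" = _
    unfold pvTokStep
    rw [if_pos rfl]
    by_cases hc : S.length = 0 ∨ S.getLast? ≠ some true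
    · rw [if_pos, pvBoolStep, if_pos hc, List.map_append]
      · rfl
      rcases hc with hc | hc
      · exact Or.inl (by simp [List.length_eq_zero_iff.mp hc])
      · exact Or.inr (by rw [hget]; exact fun hcon => hc ((pvF_inj_last S true).mp hcon))
    · rw [not_or] at hc
      rw [if_neg, pvBoolStep, if_neg (by rw [not_or]; exact hc)]
      rw [not_or]
      refine ⟨by simp [hc.1], ?_⟩
      rw [not_not] at hc ⊢
      rw [hget]
      exact (pvF_inj_last S true).mpr hc.2
  | false =>
    show pvTokStep (S.map pvF) "<" = _
    unfold pvTokStep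
    rw [if_neg (by decide : ¬ ("<" : String) = ">")]
    by_cases hc : S.length ≠ 0 ∧ S.getLast? ≠ some false
    · rw [if_pos, pvBoolStep, if_pos hc, List.map_append]
      · rfl
      refine ⟨by simp [hc.1], ?_⟩
      rw [hget]
      exact fun hcon => hc.2 ((pvF_inj_last S false).mp hcon)
    · rw [if_neg, pvBoolStep, if_neg hc]
      intro hcon
      rw [Decidable.not_and_iff_or_not] at hc
      rcases hc with hc | hc
      · exact hcon.1 (by simp [List.length_eq_zero_iff.mp (not_not.mp hc)])
      · refine hcon.2 ?_
        rw [hget]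
        exact (pvF_inj_last S false).mpr (not_not.mp hc)

-- the string fold is the boolean fold through pvF
lemma pvFoldMapF (ts : List Bool) (S : List Bool) :
    (ts.map pvF).foldl pvTokStep (S.map pvF) = (ts.foldl pvBoolStep S).map pvF := by
  induction ts generalizing S with
  | nil => rfl
  | cons b ts ih =>
    simp only [List.map_cons, List.foldl_cons, pvStepMapF]
    exact ih (pvBoolStep S b)

lemma pvChg_append_singleton (l : List Bool) (h : l ≠ []) (b : Bool) :
    pvChg (l ++ [b]) = pvChg l + (if l.getLast? ≠ some b then 1 else 0) := by
  induction l with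
  | nil => exact absurd rfl h
  | cons a l ih =>
    cases l with
    | nil => cases a <;> cases b <;> simp [pvChg]
    | cons c l =>
      simp only [List.cons_append, pvChg, List.getLast?_cons_cons]
      rw [← List.cons_append, ih (by simp)]
      ring

-- dropping fewer elements than the length keeps the last element
lemma pvGetLast?_drop (l : List Bool) (n : Nat) (h : n < l.length) :
    (l.drop n).getLast? = l.getLast? := by
  induction l generalizing n with
  | nil => simp at h
  | cons a l ih =>
    cases n with
    | zero => simp
    | succ n =>
      simp only [List.drop_succ_cons]
      rw [ih n (by simpa using h)]
      cases l with
      | nil => simp at h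
      | cons c l => simp [List.getLast?_cons_cons]

lemma pvBoolStep_last_eq (S : List Bool) (b : Bool) (h : S.getLast? = some b) :
    pvBoolStep S b = S := by
  have hne : S ≠ [] := by rintro rfl; simp at h
  cases b with
  | true =>
    rw [show pvBoolStep S true = if S.length = 0 ∨ S.getLast? ≠ some true then S ++ [true] else S from rfl,
      if_neg]
    rintro (hc | hc)
    · exact hne (List.length_eq_zero_iff.mp hc)
    · exact hc h
  | false =>
    rw [show pvBoolStep S false = if S.length ≠ 0 ∧ S.getLast? ≠ some false then S ++ [false] else S from rfl,
      if_neg]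
    rintro ⟨-, hc⟩
    exact hc h

lemma pvBoolStep_last_ne (S : List Bool) (hne : S ≠ []) (b : Bool) (h : S.getLast? ≠ some b) :
    pvBoolStep S b = S ++ [b] := by
  cases b with
  | true =>
    rw [show pvBoolStep S true = if S.length = 0 ∨ S.getLast? ≠ some true then S ++ [true] else S from rfl,
      if_pos (Or.inr h)]
  | false =>
    rw [show pvBoolStep S false = if S.length ≠ 0 ∧ S.getLast? ≠ some false then S ++ [false] else S from rfl,
      if_pos ⟨fun hc => hne (List.length_eq_zero_iff.mp hc), h⟩]

-- the main invariant: A's collapsed list vs B's first-descent + sign-change count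
lemma pvMain (t : List Bool) :
    (true ∉ t → t.foldl pvBoolStep [] = []) ∧
    (∀ j, PySem.List.index? t true = some j →
      t.foldl pvBoolStep [] ≠ [] ∧
      (t.foldl pvBoolStep []).getLast? = t.getLast? ∧
      (t.foldl pvBoolStep []).length = 1 + pvChg (t.drop j)) := by
  induction t using List.reverseRecOn with
  | nil =>
    refine ⟨fun _ => rfl, fun j hj => ?_⟩
    rw [(PySem.List.index?_eq_none_iff _ _).mpr (by simp)] at hj
    exact absurd hj (by simp)
  | append_singleton xs b ih =>
    obtain ⟨ih0, ih1⟩ := ih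
    rw [List.foldl_append, List.foldl_cons, List.foldl_nil]
    by_cases hx : true ∈ xs
    · have hxs_ne : xs ≠ [] := by rintro rfl; simp at hx
      obtain ⟨j0, hj0⟩ := Option.isSome_iff_exists.mp ((PySem.List.index?_isSome_iff _ _).mpr hx)
      obtain ⟨hne, hlast, hlen⟩ := ih1 j0 hj0
      obtain ⟨hj0lt, -⟩ := PySem.List.getElem_of_index?_eq_some hj0
      have hdropne : xs.drop j0 ≠ [] := by
        intro e
        have := congrArg List.length e
        simp at this
        omega
      set S := xs.foldl pvBoolStep [] with hSdef
      have hSlast : S.getLast? = xs.getLast? := hlast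
      constructor
      · intro hmem
        exact absurd (by simp [hx] : true ∈ xs ++ [b]) hmem
      · intro j hj
        rw [PySem.List.index?_append_of_mem [b] hx, hj0] at hj
        have hjj : j = j0 := (Option.some_injective _ hj).symm
        subst hjj
        have hdrop : (xs ++ [b]).drop j = xs.drop j ++ [b] :=
          List.drop_append_of_le_length (by omega)
        have hchg : pvChg ((xs ++ [b]).drop j) =
            pvChg (xs.drop j) + (if (xs.drop j).getLast? ≠ some b then 1 else 0) := by
          rw [hdrop, pvChg_append_singleton _ hdropne]
        have hdl : (xs.drop j).getLast? = xs.getLast? := pvGetLast?_drop xs j hj0lt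
        have hlast_app : (xs ++ [b]).getLast? = some b := by
          rw [List.getLast?_append_of_ne_nil xs (by simp : ([b] : List Bool) ≠ [])]
          rfl
        by_cases heq : xs.getLast? = some b
        · -- same token as the last: neither side grows
          have hstep : pvBoolStep S b = S := pvBoolStep_last_eq S b (hSlast.trans heq)
          rw [hstep]
          refine ⟨hne, by rw [hSlast, heq, hlast_app], ?_⟩
          have hifz : (if (xs.drop j).getLast? ≠ some b then 1 else 0) = 0 := by
            rw [if_neg]
            rw [not_not]
            exact hdl.trans heq
          rw [hlen, hchg, hifz]
          omega
        · -- token changes: both sides grow by one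
          have hstep : pvBoolStep S b = S ++ [b] :=
            pvBoolStep_last_ne S hne b (fun hc => heq (hSlast.symm.trans hc))
          rw [hstep]
          refine ⟨by simp, ?_, ?_⟩
          · rw [List.getLast?_append_of_ne_nil S (by simp : ([b] : List Bool) ≠ []), hlast_app]
            rfl
          · have hifo : (if (xs.drop j).getLast? ≠ some b then 1 else 0) = 1 := by
              rw [if_pos (hdl ▸ heq)]
            rw [List.length_append, hlen, hchg, hifo]
            simp
            omega
    · -- no descent in xs: the fold so far is empty
      have hfold : xs.foldl pvBoolStep [] = [] := ih0 hx
      rw [hfold]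
      cases b with
      | false =>
        constructor
        · intro _
          rfl
        · intro j hj
          rw [(PySem.List.index?_eq_none_iff _ _).mpr (by simp [hx] : true ∉ xs ++ [false])] at hj
          exact absurd hj (by simp)
      | true =>
        constructor
        · intro hmem
          exact absurd (by simp : true ∈ xs ++ [true]) hmem
        · intro j hj
          rw [PySem.List.index?_append_singleton_self xs true hx] at hj
          have hjj : j = xs.length := (Option.some_injective _ hj).symm
          subst hjj
          refine ⟨by simp [pvBoolStep], ?_, ?_⟩
          · show ([true] : List Bool).getLast? = (xs ++ [true]).getLast?
            rw [List.getLast?_append_of_ne_nil xs (by simp : ([true] : List Bool) ≠ [])]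
          · show ([true] : List Bool).length = 1 + pvChg ((xs ++ [true]).drop xs.length)
            rw [List.drop_append_of_le_length (by omega)]
            simp [pvChg]

-- B's 0/1 sum over the zipped token tails is pvChg
lemma pvSumZip (l : List Bool) :
    ((l.zip l.tail).map (fun p => if p.1 ≠ p.2 then (1 : Int) else 0)).sum = (pvChg l : Int) := by
  induction l with
  | nil => simp [pvChg]
  | cons a l ih =>
    cases l with
    | nil => simp [pvChg]
    | cons c l =>
      simp only [List.tail_cons, List.zip_cons_cons, List.map_cons, List.sum_cons, pvChg]
      rw [show ((c :: l).zip l) = ((c :: l).zip (c :: l).tail) by simp, ih]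
      cases a <;> cases c <;> simp

-- A's result, written over the shared boolean token list
lemma pvA_eq (A : List Int) (h : ¬ A.length < 2) :
    lenOfIrregEx A =
      ((((A.zip A.tail).filterMap pvTokOfB).foldl pvBoolStep []).length : Int) + 1 := by
  unfold lenOfIrregEx
  rw [if_neg h]
  have hfold : (PySem.List.pyRange 1 (A.length : Int) 1).foldl
      (fun (signs : List String) (i : Int) =>
        if PySem.List.pyGetD A (i - 1) 0 > PySem.List.pyGetD A i 0 then
          (if signs.length = 0 ∨ PySem.List.pyGet? signs (-1) ≠ some ">" then signs ++ [">"] else signs)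
        else if PySem.List.pyGetD A (i - 1) 0 < PySem.List.pyGetD A i 0 then
          (if signs.length ≠ 0 ∧ PySem.List.pyGet? signs (-1) ≠ some "<" then signs ++ ["<"] else signs)
        else signs) []
      = (A.zip A.tail).foldl pvG [] := by
    rw [← pvPairsMap A, List.foldl_map]
    rfl
  rw [hfold, pvFoldTok, pvTokMapF, show ([] : List String) = ([] : List Bool).map pvF from rfl,
    pvFoldMapF]
  simp

lemma pvKey (A : List Int) : lenOfIrregEx A = lenOfIrregEx_alt A := by
  by_cases h : A.length < 2
  · unfold lenOfIrregEx lenOfIrregEx_alt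
    rw [if_pos h, if_pos h]
  · rw [pvA_eq A h]
    unfold lenOfIrregEx_alt
    rw [if_neg h, PySem.List.slice_from_one]
    set t := (A.zip A.tail).filterMap pvTokOfB with ht
    obtain ⟨m0, m1⟩ := pvMain t
    by_cases hc : true ∈ t
    · obtain ⟨j, hj⟩ := Option.isSome_iff_exists.mp ((PySem.List.index?_isSome_iff _ _).mpr hc)
      obtain ⟨-, -, hlen⟩ := m1 j hj
      rw [if_neg (by simp [hc])]
      have hjd : (PySem.List.index? t true).getD 0 = j := by rw [hj]; rfl
      simp only [hjd]
      rw [hlen]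
      rw [PySem.List.slice_from_natCast]
      rw [show ((j : Int) + 1) = ((j + 1 : Nat) : Int) by push_cast; ring,
        PySem.List.slice_from_natCast]
      rw [show t.drop (j + 1) = (t.drop j).tail by rw [List.tail_drop]]
      rw [pvSumZip (t.drop j)]
      push_cast
      ring
    · rw [if_pos (by simp [hc]), m0 hc]
      simp

-- ===== VERDICT (by name: the statement is the Claim_ definition above) =====
theorem lenOfIrregEx_spec : Claim_equal_lenOfIrregEx := by
  intro A _
  unfold Spec_lenOfIrregEx
  exact pvKey A
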